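-- pv_equiv track=rewrite | github.com/hxse/pyo3-quant | py_entry/charts/utils.py | sort_timeframe_keys
-- ===== SOURCE A (Python) =====
-- from typing import List, Tuple, Optional
--
-- def sort_timeframe_keys(keys: List[str], base_key: str) -> List[str]:
--     """
--     对时间周期键进行排序
--
--     Args:
--         keys: 所有数据源键
--         base_key: 基准键 (如 "ohlcv_15m")
--
--     Returns:
--         排序后的键列表，基准键在前，同前缀按时间周期升序排列
--     """
--     # 提取基准键的前缀 (如 "ohlcv")
--     prefix = base_key.rsplit("_", 1)[0] if "_" in base_key else base_key
--
--     # 筛选同前缀的键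
--     same_prefix = [k for k in keys if k.startswith(prefix + "_")]
--     other = [k for k in keys if k not in same_prefix]
--
--     # 时间周期排序权重
--     timeframe_order = {"m": 0, "h": 1, "d": 2, "w": 3, "M": 4}
--
--     def parse_timeframe(key: str) -> Tuple[int, int]:
--         # 提取时间周期部分 (如 "15m" -> (0, 15))
--         suffix = key.rsplit("_", 1)[-1]
--         for unit, weight in timeframe_order.items():
--             if suffix.endswith(unit):
--                 try:
--                     num = int(suffix[: -len(unit)])
--                     return (weight, num)
--                 except ValueError:
--                     pass
--         return (999, 0)  # 无法解析的放最后
--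
--     # 排序：基准键优先，其余按时间周期升序
--     sorted_same = sorted(same_prefix, key=parse_timeframe)
--     if base_key in sorted_same:
--         sorted_same.remove(base_key)
--         sorted_same.insert(0, base_key)
--
--     return sorted_same + other
-- ===== SOURCE B (Python) =====
-- def sort_timeframe_keys(keys, base_key):
--     prefix = base_key.rsplit("_", 1)[0] if "_" in base_key else base_key
--     tfp = prefix + "_"
--     timeframe_order = {"m": 0, "h": 1, "d": 2, "w": 3, "M": 4}
--
--     def parse_timeframe(key):
--         suffix = key.rsplit("_", 1)[-1]
--         for unit, weight in timeframe_order.items():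
--             if suffix.endswith(unit):
--                 try:
--                     return (weight, int(suffix[: -len(unit)]))
--                 except ValueError:
--                     pass
--         return (999, 0)
--
--     def rank(k):
--         if not k.startswith(tfp):
--             return (2, 0, 0)
--         if k == base_key:
--             return (0, 0, 0)
--         w, n = parse_timeframe(k)
--         return (1, w, n)
--
--     return sorted(keys, key=rank)
-- ===== Notes on version B (the rewrite author's own statement) =====
-- stated objective: simpler
-- what changed: Replaces A's partition into same-prefix/other lists (with a quadratic 'k not in same_prefix' scan), sublist sort and manual remove/insert repositioning of the base key by one stable sorted(keys, key=rank) call whose tuple rank puts the base key first, same-prefix keys by parsed timeframe, and everything else last in original order.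
import Mathlib
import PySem

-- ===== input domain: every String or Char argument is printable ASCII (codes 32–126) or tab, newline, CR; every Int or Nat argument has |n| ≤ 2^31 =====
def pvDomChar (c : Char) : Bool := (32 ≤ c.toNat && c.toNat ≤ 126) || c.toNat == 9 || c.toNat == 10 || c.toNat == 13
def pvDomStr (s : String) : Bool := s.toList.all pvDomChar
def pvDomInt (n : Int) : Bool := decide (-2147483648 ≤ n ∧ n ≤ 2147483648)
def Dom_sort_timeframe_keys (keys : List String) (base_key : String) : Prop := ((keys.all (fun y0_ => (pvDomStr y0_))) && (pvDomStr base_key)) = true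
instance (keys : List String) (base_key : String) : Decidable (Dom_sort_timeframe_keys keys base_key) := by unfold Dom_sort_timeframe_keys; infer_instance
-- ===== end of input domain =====

-- B replaces A's partition + sublist sort + manual base-key repositioning (which includes a
-- quadratic `k not in same_prefix` scan) by a single stable sort of all keys under a tuple rank.

-- ===== shared helpers (code both Pythons contain verbatim) =====

-- s.rsplit("_", 1)[-1]; exact for the single-character separator (split at the LAST '_')
def pvRsplitLast (s : List Char) : List Char :=
  let i := PySem.Chars.rfind s ['_']
  if i = -1 then s else s.drop (i.toNat + 1)

-- base_key.rsplit("_", 1)[0] if "_" in base_key else base_key; exact for the 1-char separator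
def pvPrefix (s : List Char) : List Char :=
  if PySem.Chars.isIn ['_'] s then s.take (PySem.Chars.rfind s ['_']).toNat else s

-- timeframe_order = {"m": 0, "h": 1, "d": 2, "w": 3, "M": 4}, iterated in insertion order
def pvTimeframeOrder : List (Char × Int) := [('m', 0), ('h', 1), ('d', 2), ('w', 3), ('M', 4)]

-- the `for unit, weight in timeframe_order.items()` loop of parse_timeframe
-- (try int(...) except ValueError: pass → on none continue with the next unit)
def pvParseGo : List (Char × Int) → List Char → Int × Int
  | [], _ => (999, 0)
  | (u, w) :: rest, sfx =>
    if PySem.Chars.endswith sfx [u] then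
      match PySem.Int.ofChars? (PySem.List.slice sfx none (some (-1))) with
      | some num => (w, num)
      | none => pvParseGo rest sfx
    else pvParseGo rest sfx

-- parse_timeframe(key)
def pvParse (k : List Char) : Int × Int := pvParseGo pvTimeframeOrder (pvRsplitLast k)

-- ===== PORT A =====
def sort_timeframe_keys (keys : List String) (base_key : String) : List String :=
  let tfp := pvPrefix base_key.toList ++ ['_']
  let same_prefix := keys.filter (fun k => PySem.Chars.startswith k.toList tfp)
  let other := keys.filter (fun k => !(same_prefix.contains k))
  let ss := PySem.List.sorted2 same_prefix
      (fun k => (pvParse k.toList).1) (fun k => (pvParse k.toList).2)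
  let ss2 := if ss.contains base_key then
      match PySem.List.remove? ss base_key with
      | some l => PySem.List.insert l 0 base_key
      | none => ss
    else ss
  ss2 ++ other

-- ===== PORT B =====
-- rank(k): (0,0,0) for the base key, (1, weight, num) for other same-prefix keys, (2,0,0)
-- otherwise; the Python 3-tuple is represented as ((first, second) lex, third), which Python's
-- tuple comparison orders identically, so the stable sort is sorted2 on that pair key
def pvRank (base_key : String) (tfp : List Char) (k : String) : (Int ×ₗ Int) × Int :=
  if !(PySem.Chars.startswith k.toList tfp) then (toLex (2, 0), 0)
  else if k == base_key then (toLex (0, 0), 0)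
  else (toLex (1, (pvParse k.toList).1), (pvParse k.toList).2)

def sort_timeframe_keys_alt (keys : List String) (base_key : String) : List String :=
  let tfp := pvPrefix base_key.toList ++ ['_']
  PySem.List.sorted2 keys (fun k => (pvRank base_key tfp k).1) (fun k => (pvRank base_key tfp k).2)

-- ===== PRECONDITION & SPEC =====
-- Pre_ excludes key lists containing the base key more than once: where A's sorted/remove/insert
-- dance leaves the extra copies at their timeframe-sorted slots, a placement that is accidental;
-- B keeps all copies of the base key in front.
def Pre_sort_timeframe_keys (keys : List String) (base_key : String) : Prop :=
  keys.count base_key ≤ 1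
instance (keys : List String) (base_key : String) : Decidable (Pre_sort_timeframe_keys keys base_key) := by unfold Pre_sort_timeframe_keys; infer_instance

def pvWitness_sort_timeframe_keys : List String × String :=
  (["volume", "ohlcv_1h", "ohlcv_15m"], "ohlcv_15m")

def Spec_sort_timeframe_keys (keys : List String) (base_key : String) (out : List String) : Prop := out = sort_timeframe_keys_alt keys base_key
instance (keys : List String) (base_key : String) (out : List String) : Decidable (Spec_sort_timeframe_keys keys base_key out) := by unfold Spec_sort_timeframe_keys; infer_instance

-- ===== CLAIM (what is proved, stated in full; the proofs are below) =====
def Claim_equal_sort_timeframe_keys : Prop := ∀ (keys : List String) (base_key : String), Dom_sort_timeframe_keys keys base_key → Pre_sort_timeframe_keys keys base_key → Spec_sort_timeframe_keys keys base_key (sort_timeframe_keys keys base_key)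

-- ===== LEMMAS AND PROOFS =====

theorem pv_witness_ok :
    Dom_sort_timeframe_keys pvWitness_sort_timeframe_keys.1 pvWitness_sort_timeframe_keys.2 ∧
    Pre_sort_timeframe_keys pvWitness_sort_timeframe_keys.1 pvWitness_sort_timeframe_keys.2 := by
  constructor <;> decide


theorem pv_insertBy_append_true {α : Type} (bef : α → α → Bool) (x : α) (ys₁ ys₂ : List α)
    (h : ∀ y ∈ ys₂, bef x y = true) :
    PySem.List.insertBy bef x (ys₁ ++ ys₂) = PySem.List.insertBy bef x ys₁ ++ ys₂ := by
  induction ys₁ with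
  | nil =>
    cases ys₂ with
    | nil => simp [PySem.List.insertBy]
    | cons b t => simp [PySem.List.insertBy, h b (by simp)]
  | cons a t ih =>
    by_cases hb : bef x a = true <;> simp [PySem.List.insertBy, hb, ih]

theorem pv_insertBy_append_false {α : Type} (bef : α → α → Bool) (x : α) (ys₁ ys₂ : List α)
    (h : ∀ y ∈ ys₁, bef x y = false) :
    PySem.List.insertBy bef x (ys₁ ++ ys₂) = ys₁ ++ PySem.List.insertBy bef x ys₂ := by
  induction ys₁ with
  | nil => simp
  | cons a t ih =>
    have := h a (by simp)
    simp [PySem.List.insertBy, this]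
    exact ih (fun y hy => h y (by simp [hy]))

theorem pv_foldl_insertBy_split {α : Type} (bef : α → α → Bool) (p : α → Bool)
    (H : ∀ a b, p a = true → p b = false → bef a b = true ∧ bef b a = false) :
    ∀ (l acc₁ acc₂ : List α), (∀ y ∈ acc₁, p y = true) → (∀ y ∈ acc₂, p y = false) →
    l.foldl (fun acc x => PySem.List.insertBy bef x acc) (acc₁ ++ acc₂) =
      (l.filter p).foldl (fun acc x => PySem.List.insertBy bef x acc) acc₁ ++
      (l.filter (fun x => !p x)).foldl (fun acc x => PySem.List.insertBy bef x acc) acc₂ := by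
  intro l
  induction l with
  | nil => intro acc₁ acc₂ h1 h2; simp
  | cons a t ih =>
    intro acc₁ acc₂ h1 h2
    by_cases hp : p a = true
    · have hins : PySem.List.insertBy bef a (acc₁ ++ acc₂) =
          PySem.List.insertBy bef a acc₁ ++ acc₂ :=
        pv_insertBy_append_true bef a acc₁ acc₂
          (fun y hy => (H a y hp (h2 y hy)).1)
      have h1' : ∀ y ∈ PySem.List.insertBy bef a acc₁, p y = true := by
        intro y hy
        rcases (PySem.List.mem_insertBy bef a y acc₁).1 hy with rfl | hy
        · exact hp
        · exact h1 y hy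
      simp only [List.foldl_cons, hins, List.filter_cons, hp, if_pos, Bool.not_true]
      simpa [hp] using ih (PySem.List.insertBy bef a acc₁) acc₂ h1' h2
    · have hp' : p a = false := by simpa using hp
      have hins : PySem.List.insertBy bef a (acc₁ ++ acc₂) =
          acc₁ ++ PySem.List.insertBy bef a acc₂ :=
        pv_insertBy_append_false bef a acc₁ acc₂
          (fun y hy => (H y a (h1 y hy) hp').2)
      have h2' : ∀ y ∈ PySem.List.insertBy bef a acc₂, p y = false := by
        intro y hy
        rcases (PySem.List.mem_insertBy bef a y acc₂).1 hy with rfl | hy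
        · exact hp'
        · exact h2 y hy
      simp only [List.foldl_cons, hins, List.filter_cons, hp']
      simpa [hp'] using ih acc₁ (PySem.List.insertBy bef a acc₂) h1 h2'

theorem pv_insertBy_congr {α : Type} (bef₁ bef₂ : α → α → Bool) (x : α) (ys : List α)
    (h : ∀ y ∈ ys, bef₁ x y = bef₂ x y) :
    PySem.List.insertBy bef₁ x ys = PySem.List.insertBy bef₂ x ys := by
  induction ys with
  | nil => rfl
  | cons a t ih =>
    have ha := h a (by simp)
    by_cases hb : bef₁ x a = true <;>
      simp [PySem.List.insertBy, hb, ← ha, ih (fun y hy => h y (by simp [hy]))]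

theorem pv_foldl_insertBy_congr {α : Type} (bef₁ bef₂ : α → α → Bool) :
    ∀ (l acc : List α), (∀ x ∈ l, ∀ y, (y ∈ acc ∨ y ∈ l) → bef₁ x y = bef₂ x y) →
    l.foldl (fun acc x => PySem.List.insertBy bef₁ x acc) acc =
      l.foldl (fun acc x => PySem.List.insertBy bef₂ x acc) acc := by
  intro l
  induction l with
  | nil => intro acc h; rfl
  | cons a t ih =>
    intro acc h
    have ha : PySem.List.insertBy bef₁ a acc = PySem.List.insertBy bef₂ a acc :=
      pv_insertBy_congr bef₁ bef₂ a acc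
        (fun y hy => h a (by simp) y (Or.inl hy))
    simp only [List.foldl_cons, ha]
    refine ih (PySem.List.insertBy bef₂ a acc) ?_
    intro x hx y hy
    refine h x (by simp [hx]) y ?_
    rcases hy with hy | hy
    · rcases (PySem.List.mem_insertBy bef₂ a y acc).1 hy with rfl | hy
      · exact Or.inr (by simp)
      · exact Or.inl hy
    · exact Or.inr (by simp [hy])

theorem pv_foldl_insertBy_false {α : Type} : ∀ (l acc : List α),
    l.foldl (fun acc x => PySem.List.insertBy (fun _ _ => false) x acc) acc = acc ++ l := by
  intro l
  induction l with
  | nil => simp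
  | cons a t ih =>
    intro acc
    have : PySem.List.insertBy (fun _ _ => false) a acc = acc ++ [a] := by
      simpa using pv_insertBy_append_false (fun _ _ => false) a acc [] (by simp)
    simp [List.foldl_cons, this, ih]

theorem pv_insertBy_pairwise {α κ : Type} [LinearOrder κ] (key : α → κ) (x : α) (acc : List α)
    (h : acc.Pairwise (fun a b => key a ≤ key b)) :
    (PySem.List.insertBy (fun a b => decide (key a < key b)) x acc).Pairwise
      (fun a b => key a ≤ key b) := by
  induction acc with
  | nil => simp [PySem.List.insertBy]
  | cons a t ih =>
    rcases List.pairwise_cons.1 h with ⟨ha, ht⟩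
    by_cases hb : key x < key a
    · simp only [PySem.List.insertBy, hb, decide_true, if_pos]
      refine List.pairwise_cons.2 ⟨?_, h⟩
      intro b hb'
      rcases hb' with _ | hb'
      · exact le_of_lt hb
      · exact le_trans (le_of_lt hb) (ha _ (by assumption))
    · have : (decide (key x < key a)) = false := by simpa using hb
      simp only [PySem.List.insertBy, this, Bool.false_eq_true, if_neg, not_false_iff]
      refine List.pairwise_cons.2 ⟨?_, ih ht⟩
      intro b hb'
      rcases (PySem.List.mem_insertBy _ x b t).1 hb' with rfl | hb'
      · exact le_of_not_gt hb
      · exact ha b hb'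

theorem pv_erase_insertBy_self {α : Type} [BEq α] [LawfulBEq α] (bef : α → α → Bool) (v : α)
    (acc : List α) (h : v ∉ acc) :
    (PySem.List.insertBy bef v acc).erase v = acc := by
  induction acc with
  | nil => simp [PySem.List.insertBy]
  | cons a t ih =>
    have hav : a ≠ v := fun e => h (by simp [e])
    by_cases hb : bef v a = true
    · simp [PySem.List.insertBy, hb]
    · simp [PySem.List.insertBy, hb, hav,
        ih (fun e => h (by simp [e]))]

theorem pv_erase_insertBy {α κ : Type} [BEq α] [LawfulBEq α] [LinearOrder κ] (key : α → κ)
    (x v : α) (hxv : x ≠ v) (acc : List α) (h : acc.Pairwise (fun a b => key a ≤ key b)) :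
    (PySem.List.insertBy (fun a b => decide (key a < key b)) x acc).erase v =
      PySem.List.insertBy (fun a b => decide (key a < key b)) x (acc.erase v) := by
  induction acc with
  | nil => simp [PySem.List.insertBy, hxv]
  | cons a t ih =>
    rcases List.pairwise_cons.1 h with ⟨ha, ht⟩
    by_cases hb : key x < key a
    · by_cases hav : a = v
      · subst hav
        simp only [PySem.List.insertBy, hb, decide_true, if_pos]
        rw [List.erase_cons_tail (by simpa using hxv), List.erase_cons_head]
        cases t with
        | nil => simp [PySem.List.insertBy]
        | cons b bs =>
          have : key x < key b := lt_of_lt_of_le hb (ha b (by simp))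
          simp [PySem.List.insertBy, this]
      · simp only [PySem.List.insertBy, hb, decide_true, if_pos]
        rw [List.erase_cons_tail (by simpa using hxv), List.erase_cons_tail (by simpa using hav)]
        simp [PySem.List.insertBy, hb]
    · have hbf : (decide (key x < key a)) = false := by simpa using hb
      by_cases hav : a = v
      · subst hav
        simp [PySem.List.insertBy, hbf, List.erase_cons_head]
      · simp only [PySem.List.insertBy, hbf, Bool.false_eq_true, if_neg, not_false_iff]
        rw [List.erase_cons_tail (by simpa using hav), List.erase_cons_tail (by simpa using hav)]
        simp [PySem.List.insertBy, hbf, ih ht]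

theorem pv_erase_foldl {α κ : Type} [BEq α] [LawfulBEq α] [LinearOrder κ] (key : α → κ) (v : α) :
    ∀ (l acc : List α), v ∉ l → acc.Pairwise (fun a b => key a ≤ key b) →
    (l.foldl (fun acc x => PySem.List.insertBy (fun a b => decide (key a < key b)) x acc) acc).erase v =
      l.foldl (fun acc x => PySem.List.insertBy (fun a b => decide (key a < key b)) x acc) (acc.erase v) := by
  intro l
  induction l with
  | nil => intro acc _ _; rfl
  | cons a t ih =>
    intro acc hv hacc
    have hav : a ≠ v := fun e => hv (by simp [e])
    simp only [List.foldl_cons]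
    rw [ih _ (fun e => hv (by simp [e])) (pv_insertBy_pairwise key a acc hacc),
      pv_erase_insertBy key a v hav acc hacc]

theorem pv_first_occ {α : Type} (v : α) : ∀ (l : List α), v ∈ l →
    ∃ l₁ l₂, l = l₁ ++ v :: l₂ ∧ v ∉ l₁ := by
  intro l
  induction l with
  | nil => intro h; simp at h
  | cons a t ih =>
    intro h
    by_cases hav : a = v
    · exact ⟨[], t, by simp [hav], by simp⟩
    · have hvt : v ∈ t := by
        cases h with
        | head => exact absurd rfl hav
        | tail _ h => exact h
      rcases ih hvt with ⟨l₁, l₂, rfl, hv⟩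
      exact ⟨a :: l₁, l₂, rfl, by simp [Ne.symm, hav, hv]⟩

theorem pv_filter_ne_eq_erase {α : Type} [BEq α] [LawfulBEq α] (v : α) :
    ∀ (l : List α), l.count v ≤ 1 → l.filter (fun x => !(x == v)) = l.erase v := by
  intro l
  induction l with
  | nil => intro _; rfl
  | cons a t ih =>
    intro h
    by_cases hav : a = v
    · subst hav
      have ht : t.count a = 0 := by
        have h2 : (a :: t).count a = t.count a + 1 := by simp
        omega
      have hvt : a ∉ t := by simpa using List.count_eq_zero.1 ht
      have hft : t.filter (fun x => !(x == a)) = t :=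
        List.filter_eq_self.2 (fun b hb => by
          have : b ≠ a := fun e => hvt (e ▸ hb)
          simp [this])
      simp [List.erase_cons_head, hft]
    · have ht : t.count v ≤ 1 := by
        have h2 : (a :: t).count v = t.count v := by simp [hav]
        omega
      rw [List.filter_cons, List.erase_cons_tail (a := v) (b := a) (by simp [hav])]
      simp [hav, ih ht]

theorem pv_lex_bef {κ₁ κ₂ : Type} [LinearOrder κ₁] [LinearOrder κ₂]
    (a1 b1 : κ₁) (a2 b2 : κ₂) :
    (decide (a1 < b1) || !decide (b1 < a1) && decide (a2 < b2)) =
      decide (toLex (a1, a2) < toLex (b1, b2)) := by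
  rcases lt_trichotomy a1 b1 with h | h | h
  · simp [h, Prod.Lex.toLex_lt_toLex]
  · subst h
    simp [Prod.Lex.toLex_lt_toLex]
  · simp [h, not_lt_of_gt h, Prod.Lex.toLex_lt_toLex, ne_of_gt h]

theorem pv_sorted2_eq_sorted_lex {α κ₁ κ₂ : Type} [LinearOrder κ₁] [LinearOrder κ₂]
    (xs : List α) (k1 : α → κ₁) (k2 : α → κ₂) :
    PySem.List.sorted2 xs k1 k2 = PySem.List.sorted xs (fun x => toLex (k1 x, k2 x)) := by
  rw [PySem.List.sorted_eq_foldl_insertBy]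
  show List.foldl (fun acc x => PySem.List.insertBy
      (fun a b => decide (k1 a < k1 b) || !decide (k1 b < k1 a) && decide (k2 a < k2 b)) x acc) [] xs = _
  have : (fun (a b : α) => decide (k1 a < k1 b) || !decide (k1 b < k1 a) && decide (k2 a < k2 b)) =
      fun a b => decide (toLex (k1 a, k2 a) < toLex (k1 b, k2 b)) := by
    funext a b; exact pv_lex_bef (k1 a) (k1 b) (k2 a) (k2 b)
  rw [this]

theorem pv_sorted_erase {α κ : Type} [BEq α] [LawfulBEq α] [LinearOrder κ] (key : α → κ)
    (v : α) (l : List α) (h : l.count v ≤ 1) :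
    (PySem.List.sorted l key).erase v = PySem.List.sorted (l.erase v) key := by
  by_cases hv : v ∈ l
  · obtain ⟨l₁, l₂, rfl, hnl₁⟩ := pv_first_occ v l hv
    have hvl₂ : v ∉ l₂ := by
      have hc : (l₁ ++ v :: l₂).count v = l₁.count v + (l₂.count v + 1) := by
        simp [List.count_append]
      have h0 : l₂.count v = 0 := by omega
      simpa using List.count_eq_zero.1 h0
    have hA : (PySem.List.sorted l₁ key).Pairwise (fun a b => key a ≤ key b) :=
      PySem.List.sorted_pairwise l₁ key
    have hvA : v ∉ PySem.List.sorted l₁ key := by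
      rw [PySem.List.mem_sorted]; exact hnl₁
    rw [PySem.List.sorted_eq_foldl_insertBy, PySem.List.sorted_eq_foldl_insertBy,
      List.foldl_append, List.foldl_cons]
    rw [List.erase_append_right _ hnl₁, List.erase_cons_head, List.foldl_append]
    rw [← PySem.List.sorted_eq_foldl_insertBy l₁ key] -- ?
    rw [pv_erase_foldl key v l₂ _ hvl₂ (pv_insertBy_pairwise key v _ hA),
      pv_erase_insertBy_self _ v _ hvA]
  · have h1 : v ∉ PySem.List.sorted l key := by rw [PySem.List.mem_sorted]; exact hv
    rw [List.erase_of_not_mem h1, List.erase_of_not_mem hv]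

-- rank' : what pvRank computes on keys that do carry the prefix (proof-side abbreviation)
def pvRank' (bk k : String) : (Int ×ₗ Int) × Int :=
  if k == bk then (toLex (0, 0), 0)
  else (toLex (1, (pvParse k.toList).1), (pvParse k.toList).2)

theorem pv_rank_of_prefix (bk : String) (tfp : List Char) (k : String)
    (h : PySem.Chars.startswith k.toList tfp = true) :
    pvRank bk tfp k = pvRank' bk k := by
  simp [pvRank, pvRank', h]

theorem pv_main (keys : List String) (base_key : String)
    (hpre : keys.count base_key ≤ 1) :
    sort_timeframe_keys keys base_key = sort_timeframe_keys_alt keys base_key := by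
  -- abbreviations
  set tfp := pvPrefix base_key.toList ++ ['_'] with htfp
  set p : String → Bool := fun k => PySem.Chars.startswith k.toList tfp with hp
  set P := keys.filter p with hP
  set N := keys.filter (fun k => !p k) with hN
  set ik : String → Int ×ₗ Int :=
    fun k => toLex ((pvParse k.toList).1, (pvParse k.toList).2) with hik
  set befB : String → String → Bool := fun a b =>
    decide ((pvRank base_key tfp a).1 < (pvRank base_key tfp b).1) ||
      !decide ((pvRank base_key tfp b).1 < (pvRank base_key tfp a).1) &&
        decide ((pvRank base_key tfp a).2 < (pvRank base_key tfp b).2) with hbefB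
  set befB' : String → String → Bool := fun a b =>
    decide ((pvRank' base_key a).1 < (pvRank' base_key b).1) ||
      !decide ((pvRank' base_key b).1 < (pvRank' base_key a).1) &&
        decide ((pvRank' base_key a).2 < (pvRank' base_key b).2) with hbefB'
  -- ranks on the two sides of the prefix test
  have hrank_no : ∀ k, p k = false → pvRank base_key tfp k = (toLex (2, 0), 0) := by
    intro k hk
    simp [pvRank, hp] at hk ⊢
    simp [hk]
  have hrank_yes : ∀ k, p k = true → pvRank base_key tfp k = pvRank' base_key k := by
    intro k hk
    exact pv_rank_of_prefix base_key tfp k hk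
  -- B unfolds to one insertion-sort fold over all keys
  have hB : sort_timeframe_keys_alt keys base_key =
      keys.foldl (fun acc x => PySem.List.insertBy befB x acc) [] := rfl
  -- split B's fold along the prefix test
  have Hp : ∀ a b, p a = true → p b = false → befB a b = true ∧ befB b a = false := by
    intro a b ha hb
    simp only [hbefB]
    rw [hrank_no b hb, hrank_yes a ha]
    by_cases hab : a == base_key <;>
      simp [pvRank', hab, Prod.Lex.toLex_lt_toLex]
  have hsplitp := pv_foldl_insertBy_split befB p Hp keys [] [] (by simp) (by simp)
  simp only [List.nil_append] at hsplitp
  -- the non-prefix block keeps its original order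
  have hNmem : ∀ y ∈ N, p y = false := by
    intro y hy
    have := (List.mem_filter.1 (hN ▸ hy)).2
    simpa using this
  have hNfold : N.foldl (fun acc x => PySem.List.insertBy befB x acc) [] = N := by
    rw [pv_foldl_insertBy_congr befB (fun _ _ => false) N []
      (by
        intro x hx y hy
        have hxn := hNmem x hx
        have hyn : p y = false := by
          rcases hy with hy | hy
          · simp at hy
          · exact hNmem y hy
        simp only [hbefB]
        rw [hrank_no x hxn, hrank_no y hyn]
        simp)]
    simpa using pv_foldl_insertBy_false N []
  -- on the same-prefix block, befB agrees with befB'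
  have hPmem : ∀ y ∈ P, p y = true := fun y hy => (List.mem_filter.1 (hP ▸ hy)).2
  have hPcongr : P.foldl (fun acc x => PySem.List.insertBy befB x acc) [] =
      P.foldl (fun acc x => PySem.List.insertBy befB' x acc) [] := by
    refine pv_foldl_insertBy_congr befB befB' P [] ?_
    intro x hx y hy
    have hyP : p y = true := by
      rcases hy with hy | hy
      · simp at hy
      · exact hPmem y hy
    simp only [hbefB, hbefB']
    rw [hrank_yes x (hPmem x hx), hrank_yes y hyP]
  -- split the same-prefix block at the base key
  set q : String → Bool := fun k => k == base_key with hq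
  have Hq : ∀ a b, q a = true → q b = false → befB' a b = true ∧ befB' b a = false := by
    intro a b ha hb
    simp only [hq] at ha hb
    simp only [hbefB']
    simp [pvRank', ha, hb, Prod.Lex.toLex_lt_toLex]
  have hsplitq := pv_foldl_insertBy_split befB' q Hq P [] [] (by simp) (by simp)
  simp only [List.nil_append] at hsplitq
  set F0 := P.filter q with hF0
  set F1 := P.filter (fun x => !q x) with hF1
  -- the base-key block keeps its original order
  have hF0fold : F0.foldl (fun acc x => PySem.List.insertBy befB' x acc) [] = F0 := by
    rw [pv_foldl_insertBy_congr befB' (fun _ _ => false) F0 []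
      (by
        intro x hx y hy
        have hxq : q x = true := (List.mem_filter.1 (hF0 ▸ hx)).2
        have hyq : q y = true := by
          rcases hy with hy | hy
          · simp at hy
          · exact (List.mem_filter.1 (hF0 ▸ hy)).2
        simp only [hbefB', hq] at hxq hyq ⊢
        simp [pvRank', hxq, hyq])]
    simpa using pv_foldl_insertBy_false F0 []
  -- the remaining same-prefix keys are sorted by the parsed timeframe
  have hF1fold : F1.foldl (fun acc x => PySem.List.insertBy befB' x acc) [] =
      PySem.List.sorted F1 ik := by
    rw [PySem.List.sorted_eq_foldl_insertBy]
    refine pv_foldl_insertBy_congr befB' (fun a b => decide (ik a < ik b)) F1 [] ?_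
    intro x hx y hy
    have hyq : q y = false := by
      rcases hy with hy | hy
      · simp at hy
      · have := (List.mem_filter.1 (hF1 ▸ hy)).2
        simpa using this
    have hxq : q x = false := by
      have := (List.mem_filter.1 (hF1 ▸ hx)).2
      simpa using this
    simp only [hbefB', hik]
    rw [show pvRank' base_key x = (toLex (1, (pvParse x.toList).1), (pvParse x.toList).2) by
        simp [pvRank', hq ▸ hxq],
      show pvRank' base_key y = (toLex (1, (pvParse y.toList).1), (pvParse y.toList).2) by
        simp [pvRank', hq ▸ hyq]]
    rw [← pv_lex_bef ((pvParse x.toList).1) ((pvParse y.toList).1)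
      ((pvParse x.toList).2) ((pvParse y.toList).2)]
    simp [Prod.Lex.toLex_lt_toLex]
  -- assemble B
  have hBfull : sort_timeframe_keys_alt keys base_key =
      (F0 ++ PySem.List.sorted F1 ik) ++ N := by
    rw [hB, hsplitp, hNfold, hPcongr, hsplitq, hF0fold, hF1fold]
  -- A's pieces
  have hother : keys.filter (fun k => !(P.contains k)) = N := by
    rw [hN]
    refine List.filter_congr ?_
    intro k hk
    by_cases hkP : p k = true
    · have : k ∈ P := by rw [hP]; exact List.mem_filter.2 ⟨hk, hkP⟩
      simp [this, hkP]
    · have : k ∉ P := by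
        rw [hP]; intro hc; exact hkP (List.mem_filter.1 hc).2
      simp [this]
      simpa using hkP
  have hss : PySem.List.sorted2 P (fun k => (pvParse k.toList).1)
      (fun k => (pvParse k.toList).2) = PySem.List.sorted P ik := by
    rw [pv_sorted2_eq_sorted_lex]
  have hcountP : P.count base_key ≤ 1 :=
    le_trans (List.Sublist.count_le base_key (hP ▸ List.filter_sublist)) hpre
  have hA : sort_timeframe_keys keys base_key =
      (if (PySem.List.sorted P ik).contains base_key then
        match PySem.List.remove? (PySem.List.sorted P ik) base_key with
        | some l => PySem.List.insert l 0 base_key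
        | none => PySem.List.sorted P ik
      else PySem.List.sorted P ik) ++ N := by
    show (if (PySem.List.sorted2 P _ _).contains base_key then _ else _) ++
        keys.filter (fun k => !(P.contains k)) = _
    rw [hother, hss]
  rw [hA, hBfull]
  by_cases hmem : base_key ∈ P
  · have hmems : base_key ∈ PySem.List.sorted P ik :=
      (PySem.List.mem_sorted P ik false base_key).2 hmem
    have hcnt1 : P.count base_key = 1 :=
      le_antisymm hcountP (List.count_pos_iff.2 hmem)
    have hF0v : F0 = [base_key] := by
      rw [hF0, hq, List.filter_beq, hcnt1, List.replicate_one]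
    have hF1v : F1 = P.erase base_key := by
      rw [hF1, hq]
      exact pv_filter_ne_eq_erase base_key P hcountP
    rw [if_pos (by simpa [List.contains_iff_mem] using hmems)]
    rw [PySem.List.remove?_eq_some_erase _ base_key hmems]
    rw [pv_sorted_erase ik base_key P hcountP]
    simp only [PySem.List.insert_zero, hF0v, hF1v]
    simp
  · have hmems : base_key ∉ PySem.List.sorted P ik := by
      rw [PySem.List.mem_sorted]; exact hmem
    have hF0v : F0 = [] := by
      rw [hF0, hq, List.filter_beq, List.count_eq_zero.2 hmem, List.replicate_zero]
    have hF1v : F1 = P := by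
      rw [hF1]
      refine List.filter_eq_self.2 ?_
      intro b hb
      have : b ≠ base_key := fun e => hmem (e ▸ hb)
      simp [hq, this]
    rw [if_neg (by simpa [List.contains_iff_mem] using hmems)]
    rw [hF0v, hF1v]
    simp

-- ===== VERDICT (by name: the statement is the Claim_ definition above) =====
theorem sort_timeframe_keys_spec : Claim_equal_sort_timeframe_keys := by
  intro keys base_key _ hpre
  exact pv_main keys base_key hpre
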